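-- pv_equiv track=rewrite | github.com/TeeJizzm/AdventofCode24 | day12/day12.py | answers
-- ===== SOURCE A (Python) =====
-- DIRS = [
--     (0, 1),  # E
--     (1, 0),  # S
--     (0, -1), # W
--     (-1, 0)  # N
-- ]
--
-- def calcPerim(group):
--
--     perim = 0
--     corners = 0
--
--     for x, y in group:
--         perim += 4
--         for dy, dx in DIRS:
--             if (x+dx, y+dy) in group:
--                 perim -= 1
--
--
--     return perim, corners
--
-- def answers(groups):
--
--     total1 = 0
--     total2 = 0
--
--     for group in groups:
--         area = len(group)
--         perimeter, corners = calcPerim(group)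
--
--         total1 += area * perimeter
--         total2 += area * corners
--
--     return total1, total2
-- ===== SOURCE B (Python) =====
-- def answers(groups):
--     # Sort each region's cells twice and count adjacent pairs by scanning
--     # consecutive elements; perimeter = 4*n - 2*edges. corners is always 0.
--     total1 = 0
--     for group in groups:
--         n = len(group)
--         horiz = sorted(group)                               # lex (x, y)
--         vert = sorted(group, key=lambda c: (c[1], c[0]))    # lex (y, x)
--         edges = 0
--         for a, b in zip(horiz, horiz[1:]):
--             if b == (a[0], a[1] + 1):
--                 edges += 1
--         for a, b in zip(vert, vert[1:]):
--             if b == (a[0] + 1, a[1]):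
--                 edges += 1
--         total1 += n * (4 * n - 2 * edges)
--     return total1, 0
-- ===== Notes on version B (the rewrite author's own statement) =====
-- stated objective: alternative
-- what changed: B sorts each group twice (lexicographically by (x,y) and by (y,x)) and counts shared edges by scanning consecutive pairs of the sorted lists, then uses the closed form perimeter = 4*n - 2*edges; corners is always 0 so the second total is the constant 0. Pre_ excludes inputs where some group contains a duplicate cell, on which A's mix of per-occurrence +4 increments with presence-only membership subtraction is an accident of its list representation.
import Mathlib
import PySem

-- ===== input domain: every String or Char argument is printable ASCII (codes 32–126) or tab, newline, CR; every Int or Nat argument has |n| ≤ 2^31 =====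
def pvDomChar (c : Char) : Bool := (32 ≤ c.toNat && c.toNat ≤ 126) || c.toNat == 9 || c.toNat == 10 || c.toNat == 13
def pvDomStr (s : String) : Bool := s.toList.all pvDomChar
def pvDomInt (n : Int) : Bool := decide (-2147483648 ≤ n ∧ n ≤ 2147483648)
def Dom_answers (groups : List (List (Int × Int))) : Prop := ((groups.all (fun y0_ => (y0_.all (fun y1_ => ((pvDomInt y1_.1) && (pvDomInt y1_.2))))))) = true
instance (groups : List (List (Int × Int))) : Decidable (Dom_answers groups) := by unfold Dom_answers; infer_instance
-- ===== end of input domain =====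

-- B sorts each group twice (lex by (x,y) and by (y,x)), counts shared edges by scanning
-- consecutive pairs of the sorted lists, and uses perimeter = 4*n - 2*edges; corners is always 0.

-- ===== PORT A =====
def DIRS : List (Int × Int) := [(0, 1), (1, 0), (0, -1), (-1, 0)]

def calcPerim (group : List (Int × Int)) : Int × Int :=
  -- perim = 0; corners = 0; for x, y in group: perim += 4; for dy, dx in DIRS: if (x+dx, y+dy) in group: perim -= 1
  let perim : Int := group.foldl (fun perim c =>
    let perim := perim + 4
    DIRS.foldl (fun perim d =>
      if (c.1 + d.2, c.2 + d.1) ∈ group then perim - 1 else perim) perim) 0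
  let corners : Int := 0
  (perim, corners)

def answers (groups : List (List (Int × Int))) : Int × Int :=
  let t := groups.foldl (fun (t : Int × Int) group =>
    let area : Int := group.length
    let pc := calcPerim group
    (t.1 + area * pc.1, t.2 + area * pc.2)) (0, 0)
  (t.1, t.2)

-- ===== PORT B =====
def answers_alt (groups : List (List (Int × Int))) : Int × Int :=
  let total1 : Int := groups.foldl (fun total1 group =>
    let n : Int := group.length
    -- horiz = sorted(group); vert = sorted(group, key=lambda c: (c[1], c[0]))
    let horiz := PySem.List.sorted2 group (fun c => c.1) (fun c => c.2)
    let vert := PySem.List.sorted2 group (fun c => c.2) (fun c => c.1)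
    -- for a, b in zip(horiz, horiz[1:]): if b == (a[0], a[1] + 1): edges += 1
    let edges : Int := (horiz.zip horiz.tail).foldl
      (fun edges p => if p.2 = (p.1.1, p.1.2 + 1) then edges + 1 else edges) 0
    -- for a, b in zip(vert, vert[1:]): if b == (a[0] + 1, a[1]): edges += 1
    let edges := (vert.zip vert.tail).foldl
      (fun edges p => if p.2 = (p.1.1 + 1, p.1.2) then edges + 1 else edges) edges
    total1 + n * (4 * n - 2 * edges)) 0
  (total1, 0)

-- ===== PRECONDITION & SPEC =====
-- Pre_ excludes inputs where some group contains a duplicate cell: there A's mix of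
-- per-occurrence +4 increments with presence-only membership subtraction is an accident
-- of its list representation (a corner nobody would specify).
def Pre_answers (groups : List (List (Int × Int))) : Prop := ∀ g ∈ groups, g.Nodup
instance (groups : List (List (Int × Int))) : Decidable (Pre_answers groups) := by unfold Pre_answers; infer_instance

def pvWitness_answers : (List (List (Int × Int))) := [[(0, 0), (0, 1), (1, 0)], [(5, 5)]]

def Spec_answers (groups : List (List (Int × Int))) (out : Int × Int) : Prop := out = answers_alt groups
instance (groups : List (List (Int × Int))) (out : Int × Int) : Decidable (Spec_answers groups out) := by unfold Spec_answers; infer_instance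

-- ===== CLAIM =====
def Claim_equal_answers : Prop := ∀ (groups : List (List (Int × Int))), Dom_answers groups → Pre_answers groups → Spec_answers groups (answers groups)

-- ===== LEMMAS AND PROOFS =====

-- insertBy unfolding equations
theorem pv_ins_nil {α : Type} (before : α → α → Bool) (x : α) :
    PySem.List.insertBy before x [] = [x] := by simp [PySem.List.insertBy]

theorem pv_ins_cons {α : Type} (before : α → α → Bool) (x y : α) (ys : List α) :
    PySem.List.insertBy before x (y :: ys)
      = if before x y then x :: y :: ys else y :: PySem.List.insertBy before x ys := by
  simp [PySem.List.insertBy]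

-- insertion keeps the "no later element is before an earlier one" invariant
theorem pv_ins_pw {α : Type} (before : α → α → Bool)
    (htr : ∀ a b c, before a b = true → before b c = true → before a c = true)
    (has : ∀ a b, before a b = true → before b a = false)
    (x : α) (ys : List α) (h : ys.Pairwise (fun a b => before b a = false)) :
    (PySem.List.insertBy before x ys).Pairwise (fun a b => before b a = false) := by
  induction ys with
  | nil => simp [pv_ins_nil]
  | cons y ys ih =>
    obtain ⟨hy, hys⟩ := List.pairwise_cons.mp h
    rw [pv_ins_cons]
    by_cases hb : before x y = true
    · rw [if_pos hb]
      refine List.pairwise_cons.mpr ⟨?_, h⟩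
      intro z hz
      rcases List.mem_cons.mp hz with rfl | hz
      · exact has x z hb
      · cases hzx : before z x with
        | false => rfl
        | true => exact absurd (hy z hz) (by simp [htr z x y hzx hb])
    · rw [if_neg hb]
      refine List.pairwise_cons.mpr ⟨?_, ih hys⟩
      intro z hz
      rcases (PySem.List.insertBy_mem_iff before x z ys).mp hz with rfl | hz
      · simpa using hb
      · exact hy z hz

theorem pv_foldl_ins_pw {α : Type} (before : α → α → Bool)
    (htr : ∀ a b c, before a b = true → before b c = true → before a c = true)
    (has : ∀ a b, before a b = true → before b a = false)
    (xs acc : List α) (h : acc.Pairwise (fun a b => before b a = false)) :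
    (xs.foldl (fun a x => PySem.List.insertBy before x a) acc).Pairwise
      (fun a b => before b a = false) := by
  induction xs generalizing acc with
  | nil => exact h
  | cons x xs ih => exact ih _ (pv_ins_pw before htr has x acc h)

-- the comparison sorted2 uses (Python's lexicographic tuple order on the two keys)
def pvLex (k1 k2 : (Int × Int) → Int) (a b : Int × Int) : Bool :=
  decide (k1 a < k1 b) || (!decide (k1 b < k1 a) && decide (k2 a < k2 b))

theorem pvLex_trans (k1 k2 : (Int × Int) → Int) :
    ∀ a b c, pvLex k1 k2 a b = true → pvLex k1 k2 b c = true → pvLex k1 k2 a c = true := by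
  intro a b c h1 h2
  simp only [pvLex, Bool.or_eq_true, Bool.and_eq_true, Bool.not_eq_true',
    decide_eq_true_eq, decide_eq_false_iff_not] at *
  omega

theorem pvLex_asym (k1 k2 : (Int × Int) → Int) :
    ∀ a b, pvLex k1 k2 a b = true → pvLex k1 k2 b a = false := by
  intro a b h
  simp only [pvLex, Bool.or_eq_true, Bool.and_eq_true, Bool.not_eq_true',
    decide_eq_true_eq, decide_eq_false_iff_not, Bool.or_eq_false_iff, Bool.and_eq_false_iff,
    Bool.not_eq_false'] at *
  omega

-- if neither compares before the other, both keys agree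
theorem pvLex_tot (k1 k2 : (Int × Int) → Int) (a b : Int × Int)
    (h1 : pvLex k1 k2 a b = false) (h2 : pvLex k1 k2 b a = false) :
    k1 a = k1 b ∧ k2 a = k2 b := by
  simp only [pvLex, Bool.or_eq_false_iff, Bool.and_eq_false_iff, Bool.not_eq_false',
    decide_eq_false_iff_not, decide_eq_true_eq] at h1 h2
  omega

theorem pv_sorted2_eq (xs : List (Int × Int)) (k1 k2 : (Int × Int) → Int) :
    PySem.List.sorted2 xs k1 k2 false
      = xs.foldl (fun acc x => PySem.List.insertBy (pvLex k1 k2) x acc) [] := rfl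

-- on a duplicate-free list with jointly injective keys, sorted2's output is strictly increasing
theorem pv_sorted2_strict (xs : List (Int × Int)) (k1 k2 : (Int × Int) → Int)
    (hinj : ∀ a b : Int × Int, k1 a = k1 b → k2 a = k2 b → a = b) (hnd : xs.Nodup) :
    (PySem.List.sorted2 xs k1 k2 false).Pairwise (fun a b => pvLex k1 k2 a b = true) := by
  have hpw : (PySem.List.sorted2 xs k1 k2 false).Pairwise (fun a b => pvLex k1 k2 b a = false) := by
    rw [pv_sorted2_eq]
    exact pv_foldl_ins_pw _ (pvLex_trans k1 k2) (pvLex_asym k1 k2) xs [] List.Pairwise.nil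
  have hnds : (PySem.List.sorted2 xs k1 k2 false).Nodup :=
    ((PySem.List.sorted2_perm xs k1 k2 false).nodup_iff).mpr hnd
  refine (hpw.and hnds).imp ?_
  rintro a b ⟨hf, hne⟩
  cases hab : pvLex k1 k2 a b with
  | true => rfl
  | false =>
    obtain ⟨hk1, hk2⟩ := pvLex_tot k1 k2 a b hab hf
    exact absurd (hinj a b hk1 hk2) hne

-- in a strictly sorted list, "s a is the next element" happens exactly when s a is a member,
-- provided s a covers a in the order
theorem pv_zip_count (lt : (Int × Int) → (Int × Int) → Bool) (s : (Int × Int) → (Int × Int))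
    (htr : ∀ a b c, lt a b = true → lt b c = true → lt a c = true)
    (has : ∀ a b, lt a b = true → lt b a = false)
    (hs : ∀ a, lt a (s a) = true)
    (hcov : ∀ a b, lt a b = true → lt b (s a) = true → False) :
    ∀ (l : List (Int × Int)), l.Pairwise (fun a b => lt a b = true) →
      (l.zip l.tail).countP (fun p => decide (p.2 = s p.1))
        = l.countP (fun a => decide (s a ∈ l)) := by
  intro l
  induction l with
  | nil => simp
  | cons a t ih =>
    intro h
    obtain ⟨hhead, hpt⟩ := List.pairwise_cons.mp h
    have hsa : s a ≠ a := by
      intro e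
      have h1 := hs a
      rw [e] at h1
      simpa [h1] using has a a h1
    have hcongr : t.countP (fun x => decide (s x ∈ a :: t)) = t.countP (fun x => decide (s x ∈ t)) := by
      apply List.countP_congr
      intro x hx
      have hne : s x ≠ a := by
        intro e
        have h1 : lt a (s x) = true := htr a x (s x) (hhead x hx) (hs x)
        rw [e] at h1
        simpa [h1] using has a a h1
      simp [List.mem_cons, hne]
    cases t with
    | nil => simp [hsa]
    | cons b u =>
      have hmem : (s a ∈ a :: b :: u) ↔ b = s a := by
        constructor
        · intro hm
          rcases List.mem_cons.mp hm with e | hm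
          · exact absurd e hsa
          rcases List.mem_cons.mp hm with e | hm
          · exact e.symm
          · exfalso
            obtain ⟨hb, _⟩ := List.pairwise_cons.mp hpt
            exact hcov a b (hhead b (by simp)) (hb (s a) hm)
        · intro e
          simp [← e]
      have hz : ((a :: b :: u).zip (a :: b :: u).tail)
          = (a, b) :: ((b :: u).zip (b :: u).tail) := rfl
      calc ((a :: b :: u).zip (a :: b :: u).tail).countP (fun p => decide (p.2 = s p.1))
          = ((b :: u).zip (b :: u).tail).countP (fun p => decide (p.2 = s p.1))
              + (if b = s a then 1 else 0) := by
            rw [hz, List.countP_cons]; simp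
        _ = (b :: u).countP (fun x => decide (s x ∈ b :: u)) + (if b = s a then 1 else 0) := by
            rw [ih hpt]
        _ = (b :: u).countP (fun x => decide (s x ∈ a :: b :: u))
              + (if s a ∈ a :: b :: u then 1 else 0) := by
            rw [hcongr]
            congr 1
            simp only [hmem]
        _ = (a :: b :: u).countP (fun x => decide (s x ∈ a :: b :: u)) := by
            conv_rhs => rw [List.countP_cons]
            congr 1
            simp

def ind (b : Prop) [Decidable b] : Int := if b then 1 else 0

theorem pv_shift (T : Finset (Int × Int)) (cnt : Int × Int → Int) (d : Int × Int) :
    ∑ k ∈ T, (if k - d ∈ T then cnt k else 0) = ∑ k ∈ T, (if k + d ∈ T then cnt (k + d) else 0) := by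
  rw [← Finset.sum_filter, ← Finset.sum_filter]
  apply Finset.sum_nbij' (i := fun k => k - d) (j := fun k => k + d) <;>
    intro a ha <;> simp [Finset.mem_filter] at ha ⊢ <;> simp [ha]

def fA (g : List (Int × Int)) (c : Int × Int) : Int :=
  ind ((c.1+1, c.2) ∈ g) + ind ((c.1, c.2+1) ∈ g) + ind ((c.1-1, c.2) ∈ g) + ind ((c.1, c.2-1) ∈ g)

theorem foldA (g l : List (Int × Int)) (p : Int) :
    l.foldl (fun perim c =>
      let perim := perim + 4
      DIRS.foldl (fun perim d =>
        if (c.1 + d.2, c.2 + d.1) ∈ g then perim - 1 else perim) perim) p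
      = p + (l.map (fun c => 4 - fA g c)).sum := by
  induction l generalizing p with
  | nil => simp
  | cons c t ih =>
    rw [List.foldl_cons, ih]
    simp only [List.map_cons, List.sum_cons, DIRS, List.foldl_cons, List.foldl_nil, add_zero, ← sub_eq_add_neg]
    unfold fA ind
    split_ifs <;> ring

theorem map_sub_sum (g l : List (Int × Int)) :
    (l.map (fun c => 4 - fA g c)).sum = 4 * (l.length : Int) - (l.map (fA g)).sum := by
  induction l with
  | nil => simp
  | cons c t ih => simp [ih]; ring

-- the two interior-edge counts (south and east neighbours present)
def cS (g : List (Int × Int)) : Nat := g.countP (fun c => decide ((c.1, c.2 + 1) ∈ g))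
def cE (g : List (Int × Int)) : Nat := g.countP (fun c => decide ((c.1 + 1, c.2) ∈ g))

theorem countP_toFinset (g : List (Int × Int)) (hnd : g.Nodup) (p : (Int × Int) → Bool) :
    (g.countP p : Int) = ∑ m ∈ g.toFinset, (if p m then (1 : Int) else 0) := by
  rw [List.sum_toFinset _ hnd, PySem.List.sum_map_ite_one_zero]

theorem sum_fA (g : List (Int × Int)) (hnd : g.Nodup) :
    (g.map (fA g)).sum = 2 * ((cS g : Int) + (cE g : Int)) := by
  rw [← List.sum_toFinset _ hnd]
  have hSi := countP_toFinset g hnd (fun c => decide ((c.1, c.2 + 1) ∈ g))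
  have hEi := countP_toFinset g hnd (fun c => decide ((c.1 + 1, c.2) ∈ g))
  rw [cS, cE, hSi, hEi]
  have hW := pv_shift g.toFinset (fun _ => (1 : Int)) ((1 : Int), (0 : Int))
  have hN := pv_shift g.toFinset (fun _ => (1 : Int)) ((0 : Int), (1 : Int))
  have expand : ∀ m : Int × Int, fA g m
      = (if m + ((1:Int),(0:Int)) ∈ g.toFinset then (1:Int) else 0)
        + (if m + ((0:Int),(1:Int)) ∈ g.toFinset then (1:Int) else 0)
        + (if m - ((1:Int),(0:Int)) ∈ g.toFinset then (1:Int) else 0)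
        + (if m - ((0:Int),(1:Int)) ∈ g.toFinset then (1:Int) else 0) := by
    intro m
    have e1 : (m.1 + 1, m.2) = m + ((1:Int),(0:Int)) := by cases m; simp [Prod.mk_add_mk]
    have e2 : (m.1, m.2 + 1) = m + ((0:Int),(1:Int)) := by cases m; simp [Prod.mk_add_mk]
    have e3 : (m.1 - 1, m.2) = m - ((1:Int),(0:Int)) := by cases m; simp [Prod.mk_sub_mk]
    have e4 : (m.1, m.2 - 1) = m - ((0:Int),(1:Int)) := by cases m; simp [Prod.mk_sub_mk]
    simp only [fA, ind, ← List.mem_toFinset, e1, e2, e3, e4]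
  rw [Finset.sum_congr rfl (fun m _ => expand m)]
  rw [Finset.sum_add_distrib, Finset.sum_add_distrib, Finset.sum_add_distrib, hW, hN]
  have h1 : ∀ d : Int × Int, ∑ k ∈ g.toFinset, (if k + d ∈ g.toFinset then ((fun _ => (1:Int)) (k + d)) else 0)
      = ∑ k ∈ g.toFinset, (if k + d ∈ g.toFinset then (1:Int) else 0) := fun d => rfl
  have conv : ∀ d : Int × Int, ∑ m ∈ g.toFinset, (if decide ((m.1 + d.1, m.2 + d.2) ∈ g) then (1:Int) else 0)
      = ∑ m ∈ g.toFinset, (if m + d ∈ g.toFinset then (1:Int) else 0) := by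
    intro d
    refine Finset.sum_congr rfl fun m _ => ?_
    have e : (m.1 + d.1, m.2 + d.2) = m + d := by cases m; cases d; simp [Prod.mk_add_mk]
    simp [e, ← List.mem_toFinset]
  have convS := conv ((0:Int),(1:Int))
  have convE := conv ((1:Int),(0:Int))
  simp only [add_zero] at convS convE
  rw [convS, convE]
  ring

-- per-group values of each port
def aval (g : List (Int × Int)) : Int := (g.length : Int) * (calcPerim g).1

def bval (g : List (Int × Int)) : Int :=
  let n : Int := g.length
  let horiz := PySem.List.sorted2 g (fun c => c.1) (fun c => c.2)
  let vert := PySem.List.sorted2 g (fun c => c.2) (fun c => c.1)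
  let edges : Int := (horiz.zip horiz.tail).foldl
    (fun edges p => if p.2 = (p.1.1, p.1.2 + 1) then edges + 1 else edges) 0
  let edges := (vert.zip vert.tail).foldl
    (fun edges p => if p.2 = (p.1.1 + 1, p.1.2) then edges + 1 else edges) edges
  n * (4 * n - 2 * edges)

theorem aval_eq (g : List (Int × Int)) (hnd : g.Nodup) :
    aval g = (g.length : Int) * (4 * (g.length : Int) - 2 * ((cS g : Int) + (cE g : Int))) := by
  simp only [aval, calcPerim]
  rw [foldA, map_sub_sum, sum_fA g hnd, zero_add]

theorem countP_mem_perm (l g : List (Int × Int)) (hp : l.Perm g) (s : (Int × Int) → (Int × Int)) :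
    l.countP (fun a => decide (s a ∈ l)) = g.countP (fun a => decide (s a ∈ g)) := by
  have h1 : l.countP (fun a => decide (s a ∈ l)) = l.countP (fun a => decide (s a ∈ g)) :=
    List.countP_congr (fun x _ => by simp [hp.mem_iff])
  rw [h1]
  exact hp.countP_eq _

theorem bval_eq (g : List (Int × Int)) (hnd : g.Nodup) :
    bval g = (g.length : Int) * (4 * (g.length : Int) - 2 * ((cS g : Int) + (cE g : Int))) := by
  have hinjH : ∀ a b : Int × Int, a.1 = b.1 → a.2 = b.2 → a = b := by
    intro a b h1 h2; exact Prod.ext h1 h2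
  have hinjV : ∀ a b : Int × Int, a.2 = b.2 → a.1 = b.1 → a = b := by
    intro a b h1 h2; exact Prod.ext h2 h1
  have hH := pv_sorted2_strict g (fun c => c.1) (fun c => c.2) hinjH hnd
  have hV := pv_sorted2_strict g (fun c => c.2) (fun c => c.1) hinjV hnd
  have hsH : ∀ a : Int × Int, pvLex (fun c => c.1) (fun c => c.2) a (a.1, a.2 + 1) = true := by
    intro a; simp [pvLex]
  have hcovH : ∀ a b : Int × Int, pvLex (fun c => c.1) (fun c => c.2) a b = true →
      pvLex (fun c => c.1) (fun c => c.2) b (a.1, a.2 + 1) = true → False := by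
    intro a b h1 h2
    simp only [pvLex, Bool.or_eq_true, Bool.and_eq_true, Bool.not_eq_eq_eq_not, Bool.not_true,
      decide_eq_true_eq, decide_eq_false_iff_not] at h1 h2
    omega
  have hsV : ∀ a : Int × Int, pvLex (fun c => c.2) (fun c => c.1) a (a.1 + 1, a.2) = true := by
    intro a; simp [pvLex]
  have hcovV : ∀ a b : Int × Int, pvLex (fun c => c.2) (fun c => c.1) a b = true →
      pvLex (fun c => c.2) (fun c => c.1) b (a.1 + 1, a.2) = true → False := by
    intro a b h1 h2
    simp only [pvLex, Bool.or_eq_true, Bool.and_eq_true, Bool.not_eq_eq_eq_not, Bool.not_true,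
      decide_eq_true_eq, decide_eq_false_iff_not] at h1 h2
    omega
  have zcH := pv_zip_count _ _ (pvLex_trans _ _) (pvLex_asym _ _) hsH hcovH
    (PySem.List.sorted2 g (fun c => c.1) (fun c => c.2)) hH
  have zcV := pv_zip_count _ _ (pvLex_trans _ _) (pvLex_asym _ _) hsV hcovV
    (PySem.List.sorted2 g (fun c => c.2) (fun c => c.1)) hV
  have permH := PySem.List.sorted2_perm g (fun c => c.1) (fun c => c.2) false
  have permV := PySem.List.sorted2_perm g (fun c => c.2) (fun c => c.1) false
  have hcH : (((PySem.List.sorted2 g (fun c => c.1) (fun c => c.2)).zip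
        (PySem.List.sorted2 g (fun c => c.1) (fun c => c.2)).tail).countP
        (fun p => decide (p.2 = (p.1.1, p.1.2 + 1))) : Nat) = cS g := by
    rw [zcH, countP_mem_perm _ g permH]
    rfl
  have hcV : (((PySem.List.sorted2 g (fun c => c.2) (fun c => c.1)).zip
        (PySem.List.sorted2 g (fun c => c.2) (fun c => c.1)).tail).countP
        (fun p => decide (p.2 = (p.1.1 + 1, p.1.2))) : Nat) = cE g := by
    rw [zcV, countP_mem_perm _ g permV]
    rfl
  have fold1 : ∀ (l : List ((Int × Int) × (Int × Int))) (a : Int),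
      l.foldl (fun edges p => if p.2 = (p.1.1, p.1.2 + 1) then edges + 1 else edges) a
        = a + (l.countP (fun p => decide (p.2 = (p.1.1, p.1.2 + 1))) : Int) := by
    intro l a
    have := PySem.List.foldl_count_if (fun p : (Int × Int) × (Int × Int) => decide (p.2 = (p.1.1, p.1.2 + 1))) l a
    simpa using this
  have fold2 : ∀ (l : List ((Int × Int) × (Int × Int))) (a : Int),
      l.foldl (fun edges p => if p.2 = (p.1.1 + 1, p.1.2) then edges + 1 else edges) a
        = a + (l.countP (fun p => decide (p.2 = (p.1.1 + 1, p.1.2))) : Int) := by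
    intro l a
    have := PySem.List.foldl_count_if (fun p : (Int × Int) × (Int × Int) => decide (p.2 = (p.1.1 + 1, p.1.2))) l a
    simpa using this
  simp only [bval]
  rw [fold1, fold2, hcH, hcV]
  ring

theorem outA (gs : List (List (Int × Int))) (t : Int × Int) :
    gs.foldl (fun (t : Int × Int) group =>
      let area : Int := group.length
      let pc := calcPerim group
      (t.1 + area * pc.1, t.2 + area * pc.2)) t
      = (t.1 + (gs.map aval).sum, t.2) := by
  induction gs generalizing t with
  | nil => simp
  | cons a l ih =>
    rw [List.foldl_cons, ih]
    simp only [List.map_cons, List.sum_cons, aval, calcPerim]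
    simp only [Prod.mk.injEq, mul_zero, add_zero]
    refine ⟨by ring, by simp⟩

theorem outB (gs : List (List (Int × Int))) (t : Int) :
    gs.foldl (fun total1 group =>
      let n : Int := group.length
      let horiz := PySem.List.sorted2 group (fun c => c.1) (fun c => c.2)
      let vert := PySem.List.sorted2 group (fun c => c.2) (fun c => c.1)
      let edges : Int := (horiz.zip horiz.tail).foldl
        (fun edges p => if p.2 = (p.1.1, p.1.2 + 1) then edges + 1 else edges) 0
      let edges := (vert.zip vert.tail).foldl
        (fun edges p => if p.2 = (p.1.1 + 1, p.1.2) then edges + 1 else edges) edges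
      total1 + n * (4 * n - 2 * edges)) t
      = t + (gs.map bval).sum := by
  induction gs generalizing t with
  | nil => simp
  | cons a l ih =>
    rw [List.foldl_cons, ih]
    simp only [List.map_cons, List.sum_cons, bval]
    ring

theorem answers_eq (gs : List (List (Int × Int))) (h : ∀ g ∈ gs, g.Nodup) :
    answers gs = answers_alt gs := by
  simp only [answers, answers_alt]
  rw [outA, outB, zero_add, zero_add]
  have : (gs.map aval).sum = (gs.map bval).sum := by
    congr 1
    apply List.map_congr_left
    intro g hg
    rw [aval_eq g (h g hg), bval_eq g (h g hg)]
  rw [this]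

-- ===== VERDICT =====
theorem answers_spec : Claim_equal_answers := by
  intro groups _ hpre
  unfold Spec_answers
  exact answers_eq groups hpre
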